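-- pv_equiv track=rewrite | github.com/cccorn/Q-ATPG | lib/libspd.py | gf2_indp
-- ===== SOURCE A (Python) =====
-- def gf2_indp(rows):
--     rows=rows.copy()
--     while rows:
--         pivot_row = rows.pop()
--         if pivot_row:
--             lsb = pivot_row & -pivot_row
--             for index, row in enumerate(rows):
--                 if row & lsb:
--                     rows[index] = row ^ pivot_row
--         else:
--             return False
--     return True
-- ===== SOURCE B (Python) =====
-- def gf2_indp(rows):
--     # Incremental GF(2) basis: reduce each row against a basis kept in
--     # ascending order of lowest set bit; a row that reduces to 0 means
--     # linear dependence. Input is never mutated.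
--     basis = []
--     for row in rows:
--         r = row
--         for v in basis:
--             if r & (v & -v):
--                 r ^= v
--         if r == 0:
--             return False
--         lsb = r & -r
--         i = 0
--         while i < len(basis) and (basis[i] & -basis[i]) < lsb:
--             i += 1
--         basis.insert(i, r)
--     return True
-- ===== Notes on version B (the rewrite author's own statement) =====
-- stated objective: faster
-- what changed: A repeatedly pops the last row and XORs it into every remaining row containing its lowest set bit (a destructive elimination pass over the whole shrinking copy for each pivot); B makes a single pass over the rows, reducing each row only against an incrementally built basis kept sorted by lowest set bit, never mutating the input.
import Mathlib
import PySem

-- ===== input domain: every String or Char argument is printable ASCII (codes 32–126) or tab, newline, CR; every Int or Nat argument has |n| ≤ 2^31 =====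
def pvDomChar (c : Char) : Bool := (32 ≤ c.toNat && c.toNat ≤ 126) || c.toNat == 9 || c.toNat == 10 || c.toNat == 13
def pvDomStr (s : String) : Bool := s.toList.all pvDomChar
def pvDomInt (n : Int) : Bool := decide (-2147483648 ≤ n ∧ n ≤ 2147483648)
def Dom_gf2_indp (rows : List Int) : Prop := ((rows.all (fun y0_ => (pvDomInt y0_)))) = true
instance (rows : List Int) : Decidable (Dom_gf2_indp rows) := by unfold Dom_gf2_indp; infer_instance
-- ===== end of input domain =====

-- B replaces A's destructive last-row Gaussian elimination by a one-pass incremental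
-- basis construction (basis kept sorted by lowest set bit); same results, no mutation.

-- ===== PORT A =====
def gf2Loop (rows : List Int) : Bool :=
  if h : rows = [] then true
  else
    let pivot := rows.getLast h
    if pivot ≠ 0 then
      let lsb := PySem.Int.band pivot (-pivot)
      gf2Loop (rows.dropLast.map fun r =>
        if PySem.Int.band r lsb ≠ 0 then PySem.Int.bxor r pivot else r)
    else false
termination_by rows.length
decreasing_by
  simp only [List.length_map, List.length_dropLast]
  have : rows.length ≠ 0 := fun h0 => h (List.length_eq_zero_iff.mp h0)
  omega

def gf2_indp (rows : List Int) : Bool := gf2Loop rows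

-- ===== PORT B =====
def reduceRow (basis : List Int) (row : Int) : Int :=
  basis.foldl (fun r v =>
    if PySem.Int.band r (PySem.Int.band v (-v)) ≠ 0 then PySem.Int.bxor r v else r) row

def insertRow (r : Int) : List Int → List Int
  | [] => [r]
  | v :: vs =>
    if PySem.Int.band v (-v) < PySem.Int.band r (-r) then v :: insertRow r vs
    else r :: v :: vs

def gf2AltLoop (basis : List Int) : List Int → Bool
  | [] => true
  | row :: rest =>
    let r := reduceRow basis row
    if r = 0 then false else gf2AltLoop (insertRow r basis) rest

def gf2_indp_alt (rows : List Int) : Bool := gf2AltLoop [] rows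

-- ===== PRECONDITION & SPEC =====
def Spec_gf2_indp (rows : List Int) (out : Bool) : Prop := out = gf2_indp_alt rows
instance (rows : List Int) (out : Bool) : Decidable (Spec_gf2_indp rows out) := by unfold Spec_gf2_indp; infer_instance

-- ===== CLAIM (what is proved, stated in full; the proofs are below) =====
def Claim_equal_gf2_indp : Prop := ∀ (rows : List Int), Dom_gf2_indp rows → Spec_gf2_indp rows (gf2_indp rows)

-- ===== LEMMAS AND PROOFS =====
-- Nat: m - (m &&& n) = ldiff m n
theorem nat_sub_and (m n : Nat) : m - (m &&& n) = Nat.ldiff m n := by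
  induction m using Nat.binaryRec generalizing n with
  | zero => simp [Nat.ldiff]
  | bit b m ih =>
    rw [← Nat.bit_bodd_div2 n, Nat.land_bit, Nat.ldiff_bit, ← ih n.div2]
    have h1 : (m &&& n.div2) ≤ m := Nat.and_le_left
    cases b <;> cases hb : n.bodd <;>
      simp only [Nat.bit, Bool.and_false, Bool.and_true, Bool.not_false, Bool.not_true,
        cond_true, cond_false] <;> omega

theorem band_eq_land (a b : Int) : PySem.Int.band a b = Int.land a b := by
  rcases a with m | m <;> rcases b with n | n <;>
    simp [PySem.Int.band, Int.land, Int.negSucc_eq, nat_sub_and] <;> omega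

theorem bxor_eq_xor (a b : Int) : PySem.Int.bxor a b = Int.xor a b := by
  rcases a with m | m <;> rcases b with n | n <;>
    simp [PySem.Int.bxor, Int.xor, Int.negSucc_eq] <;> omega

-- Int extensionality by testBit
theorem int_eq_of_testBit_eq {a b : Int} (h : ∀ k, a.testBit k = b.testBit k) : a = b := by
  rcases a with m | m <;> rcases b with n | n
  · exact congrArg _ (Nat.eq_of_testBit_eq fun i => h i)
  · obtain ⟨k, hk⟩ : ∃ k, m < 2 ^ k ∧ n < 2 ^ k := ⟨m + n + 1, by
      have := Nat.lt_two_pow_self (n := m + n + 1); omega, by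
      have := Nat.lt_two_pow_self (n := m + n + 1); omega⟩
    have := h k
    simp [Int.testBit, Nat.testBit_lt_two_pow hk.1, Nat.testBit_lt_two_pow hk.2] at this
  · obtain ⟨k, hk⟩ : ∃ k, m < 2 ^ k ∧ n < 2 ^ k := ⟨m + n + 1, by
      have := Nat.lt_two_pow_self (n := m + n + 1); omega, by
      have := Nat.lt_two_pow_self (n := m + n + 1); omega⟩
    have := h k
    simp [Int.testBit, Nat.testBit_lt_two_pow hk.1, Nat.testBit_lt_two_pow hk.2] at this
  · have : m = n := Nat.eq_of_testBit_eq fun i => by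
      have := h i; simpa [Int.testBit] using this
    exact congrArg _ this

theorem tb_zero (k : ℕ) : Int.testBit 0 k = false := by
  show (Int.ofNat 0).testBit k = false
  simp [Int.testBit]

theorem ixor_comm (a b : Int) : Int.xor a b = Int.xor b a :=
  int_eq_of_testBit_eq fun k => by simp [Bool.xor_comm]

theorem ixor_assoc (a b c : Int) : Int.xor (Int.xor a b) c = Int.xor a (Int.xor b c) :=
  int_eq_of_testBit_eq fun k => by simp [Bool.xor_assoc]

theorem ixor_zero (a : Int) : Int.xor a 0 = a :=
  int_eq_of_testBit_eq fun k => by simp [tb_zero]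

theorem zero_ixor (a : Int) : Int.xor 0 a = a :=
  int_eq_of_testBit_eq fun k => by simp [tb_zero]

theorem ixor_self (a : Int) : Int.xor a a = 0 :=
  int_eq_of_testBit_eq fun k => by simp [tb_zero]

theorem iland_zero_left (y : Int) : Int.land 0 y = 0 :=
  int_eq_of_testBit_eq fun k => by simp [tb_zero]

theorem iland_xor_right (a b l : Int) :
    Int.land (Int.xor a b) l = Int.xor (Int.land a l) (Int.land b l) :=
  int_eq_of_testBit_eq fun k => by
    simp only [Int.testBit_land, Int.testBit_lxor]
    cases a.testBit k <;> cases b.testBit k <;> cases l.testBit k <;> rfl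

theorem iland_absorb (x y : Int) : Int.land x (Int.land x y) = Int.land x y :=
  int_eq_of_testBit_eq fun k => by
    simp only [Int.testBit_land]
    cases x.testBit k <;> cases y.testBit k <;> rfl

theorem lnot_eq (d : Int) : Int.lnot d = -d - 1 := by
  rcases d with m | m <;> simp [Int.lnot, Int.negSucc_eq] <;> ring

theorem land_lnot_self (d : Int) : Int.land d (Int.lnot d) = 0 :=
  int_eq_of_testBit_eq fun k => by
    simp only [Int.testBit_land, Int.testBit_lnot, tb_zero]
    cases d.testBit k <;> rfl

theorem neg_bit_true (d : Int) : -(Int.bit true d) = Int.bit true (-d - 1) := by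
  simp [Int.bit_val]; ring

theorem neg_bit_false (d : Int) : -(Int.bit false d) = Int.bit false (-d) := by
  simp [Int.bit_val]

theorem lsb_spec_aux : ∀ (n : ℕ) (x : Int), x.natAbs ≤ n → x ≠ 0 →
    ∃ i : ℕ, Int.land x (-x) = 2 ^ i ∧ x.testBit i = true ∧ ∀ j, j < i → x.testBit j = false := by
  intro n
  induction n with
  | zero =>
    intro x h hx
    exact absurd (Int.natAbs_eq_zero.mp (Nat.le_zero.mp h)) hx
  | succ n ih =>
    intro x hle hx
    have hd := Int.bit_decomp x
    cases hb : x.bodd with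
    | true =>
      rw [hb] at hd
      refine ⟨0, ?_, ?_, fun j hj => absurd hj (by omega)⟩
      · rw [← hd, neg_bit_true, Int.land_bit]
        have h0 : Int.land x.div2 (-x.div2 - 1) = 0 := by
          rw [← lnot_eq]; exact land_lnot_self _
        rw [h0]
        simp [Int.bit_val]
      · rw [← hd]; simp
    | false =>
      rw [hb] at hd
      have hd0 : x.div2 ≠ 0 := by
        intro h0
        rw [h0] at hd
        simp [Int.bit_val] at hd
        exact hx hd.symm
      have habs : x.natAbs = 2 * x.div2.natAbs := by
        conv_lhs => rw [← hd]
        simp [Int.bit_val, Int.natAbs_mul]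
      have hlt : x.div2.natAbs ≤ n := by
        have h1 : 1 ≤ x.div2.natAbs := Int.natAbs_pos.mpr hd0
        omega
      obtain ⟨i, h1, h2, h3⟩ := ih x.div2 hlt hd0
      refine ⟨i + 1, ?_, ?_, ?_⟩
      · rw [← hd, neg_bit_false, Int.land_bit, Bool.and_self, h1]
        simp [Int.bit_val]; ring
      · rw [← hd]
        simpa using (Int.testBit_bit_succ i false x.div2).trans h2
      · intro j hj
        rw [← hd]
        cases j with
        | zero => simp
        | succ j => simpa using (Int.testBit_bit_succ j false x.div2).trans (h3 j (by omega))

theorem lsb_spec (x : Int) (hx : x ≠ 0) :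
    ∃ i : ℕ, Int.land x (-x) = 2 ^ i ∧ x.testBit i = true ∧ ∀ j, j < i → x.testBit j = false :=
  lsb_spec_aux x.natAbs x le_rfl hx

theorem tb_two_pow (i k : ℕ) : Int.testBit ((2:Int) ^ i) k = decide (i = k) := by
  have h : ((2:Int) ^ i) = Int.ofNat (2 ^ i) := by
    simp [Int.ofNat_eq_natCast]
  rw [h]
  show Nat.testBit (2 ^ i) k = decide (i = k)
  exact Nat.testBit_two_pow

theorem two_pow_ne_zero_int (i : ℕ) : (2:Int) ^ i ≠ 0 := pow_ne_zero i two_ne_zero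

theorem land_two_pow (y : Int) (i : ℕ) :
    Int.land y ((2:Int) ^ i) = if y.testBit i then (2:Int) ^ i else 0 := by
  split
  · next h =>
    apply int_eq_of_testBit_eq; intro k
    by_cases hk : i = k
    · subst hk; simp [Int.testBit_land, tb_two_pow, h]
    · simp [Int.testBit_land, tb_two_pow, hk]
  · next h =>
    apply int_eq_of_testBit_eq; intro k
    by_cases hk : i = k
    · subst hk; simp [Int.testBit_land, tb_two_pow, Bool.eq_false_iff.mpr h, tb_zero]
    · simp [Int.testBit_land, tb_two_pow, hk, tb_zero]

theorem two_pow_lt_two_pow_int {i j : ℕ} : (2:Int) ^ i < 2 ^ j ↔ i < j :=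
  pow_lt_pow_iff_right₀ one_lt_two

theorem ixor_left_comm (a b c : Int) :
    Int.xor a (Int.xor b c) = Int.xor b (Int.xor a c) :=
  int_eq_of_testBit_eq fun k => by
    simp only [Int.testBit_lxor]
    cases a.testBit k <;> cases b.testBit k <;> cases c.testBit k <;> rfl

theorem ixor_self_cancel (a b : Int) : Int.xor a (Int.xor a b) = b := by
  rw [← ixor_assoc, ixor_self, zero_ixor]

theorem ixor4 (a b c d : Int) :
    Int.xor (Int.xor a b) (Int.xor c d) = Int.xor (Int.xor a c) (Int.xor b d) :=
  int_eq_of_testBit_eq fun k => by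
    simp only [Int.testBit_lxor]
    cases a.testBit k <;> cases b.testBit k <;> cases c.testBit k <;> cases d.testBit k <;> rfl

def lowbit (x : Int) : Int := Int.land x (-x)

theorem lowbit_spec (v : Int) (hv : v ≠ 0) :
    ∃ i : ℕ, lowbit v = 2 ^ i ∧ v.testBit i = true ∧ ∀ j, j < i → v.testBit j = false :=
  lsb_spec v hv

theorem land_lowbit_self (y : Int) : Int.land y (lowbit y) = lowbit y := iland_absorb y (-y)

theorem lowbit_ne_zero (v : Int) (hv : v ≠ 0) : lowbit v ≠ 0 := by
  obtain ⟨i, hi, -, -⟩ := lowbit_spec v hv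
  rw [hi]; exact two_pow_ne_zero_int i

theorem land_lowbit_cases (y v : Int) (hv : v ≠ 0) :
    Int.land y (lowbit v) = 0 ∨ Int.land y (lowbit v) = lowbit v := by
  obtain ⟨i, hi, -, -⟩ := lowbit_spec v hv
  rw [hi, land_two_pow]
  split <;> simp

theorem land_lowbit_eq_zero_of_lt (v w : Int) (hv : v ≠ 0) (hw : w ≠ 0)
    (hlt : lowbit v < lowbit w) : Int.land w (lowbit v) = 0 := by
  obtain ⟨i, hi, -, -⟩ := lowbit_spec v hv
  obtain ⟨j, hj, -, hjl⟩ := lowbit_spec w hw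
  rw [hi] at hlt ⊢
  rw [hj] at hlt
  have hij : i < j := two_pow_lt_two_pow_int.mp hlt
  rw [land_two_pow, hjl i hij]
  simp

-- masked xor-sums
def msum : List Int → List Bool → Int
  | _, [] => 0
  | [], _ => 0
  | r :: rs, b :: bs => Int.xor (cond b r 0) (msum rs bs)

theorem msum_nil (m : List Bool) : msum [] m = 0 := by cases m <;> rfl

theorem msum_replicate_false (rows : List Int) (k : ℕ) :
    msum rows (List.replicate k false) = 0 := by
  induction rows generalizing k with
  | nil => exact msum_nil _
  | cons r rs ih =>
    cases k with
    | zero => rfl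
    | succ k => simp [msum, List.replicate_succ, ih k, zero_ixor]

theorem msum_of_any_false : ∀ (rows : List Int) (m : List Bool),
    m.any id = false → msum rows m = 0
  | rows, [], _ => by cases rows <;> rfl
  | [], _ :: _, _ => rfl
  | r :: rs, b :: bs, h => by
    simp only [List.any_cons, Bool.or_eq_false_iff, id] at h
    simp [msum, h.1, msum_of_any_false rs bs h.2, ixor_zero, zero_ixor]

theorem msum_append : ∀ (l1 l2 : List Int) (m1 m2 : List Bool),
    m1.length = l1.length →
    msum (l1 ++ l2) (m1 ++ m2) = Int.xor (msum l1 m1) (msum l2 m2)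
  | [], l2, [], m2, _ => by simp [msum_nil, zero_ixor]
  | r :: rs, l2, b :: bs, m2, h => by
    simp only [List.cons_append, msum]
    rw [msum_append rs l2 bs m2 (by simpa using h), ixor_assoc]

def SpanMem (x : Int) (B : List Int) : Prop :=
  ∃ m : List Bool, m.length = B.length ∧ msum B m = x

theorem spanMem_zero (B : List Int) : SpanMem 0 B :=
  ⟨List.replicate B.length false, by simp, msum_replicate_false B _⟩

theorem spanMem_of_mem {v : Int} {B : List Int} (h : v ∈ B) : SpanMem v B := by
  induction B with
  | nil => cases h
  | cons w ws ih =>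
    rcases List.mem_cons.mp h with rfl | h'
    · exact ⟨true :: List.replicate ws.length false, by simp,
        by simp [msum, msum_replicate_false, ixor_zero]⟩
    · obtain ⟨m, hm, hs⟩ := ih h'
      exact ⟨false :: m, by simpa using hm, by simp [msum, hs, zero_ixor]⟩

theorem cond_xor (b c : Bool) (v : Int) :
    cond (b ^^ c) v 0 = Int.xor (cond b v 0) (cond c v 0) := by
  cases b <;> cases c <;> simp [ixor_self, ixor_zero, zero_ixor]

theorem msum_zipWith : ∀ (B : List Int) (m1 m2 : List Bool),
    m1.length = B.length → m2.length = B.length →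
    msum B (List.zipWith (· ^^ ·) m1 m2) = Int.xor (msum B m1) (msum B m2)
  | [], m1, m2, h1, h2 => by simp [msum_nil, ixor_zero]
  | v :: vs, b :: bs, c :: cs, h1, h2 => by
    simp only [List.zipWith_cons_cons, msum]
    rw [msum_zipWith vs bs cs (by simpa using h1) (by simpa using h2), cond_xor, ixor4]

theorem spanMem_xor {x y : Int} {B : List Int} (hx : SpanMem x B) (hy : SpanMem y B) :
    SpanMem (Int.xor x y) B := by
  obtain ⟨m1, h1, e1⟩ := hx
  obtain ⟨m2, h2, e2⟩ := hy
  exact ⟨List.zipWith (· ^^ ·) m1 m2, by simp [List.length_zipWith, h1, h2],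
    by rw [msum_zipWith B m1 m2 h1 h2, e1, e2]⟩

theorem spanMem_msum {C : List Int} : ∀ (B : List Int) (m : List Bool),
    (∀ v ∈ B, SpanMem v C) → SpanMem (msum B m) C
  | _, [] => fun _ => by
    cases ‹List Int› <;> · simp only [msum]; exact spanMem_zero C
  | [], _ :: _ => fun _ => by simp only [msum]; exact spanMem_zero C
  | v :: vs, b :: bs => fun h => by
    simp only [msum]
    apply spanMem_xor
    · cases b
      · exact spanMem_zero C
      · exact h v List.mem_cons_self
    · exact spanMem_msum vs bs fun w hw => h w (List.mem_cons_of_mem _ hw)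

theorem spanMem_trans {x : Int} {B C : List Int}
    (hBC : ∀ v ∈ B, SpanMem v C) (hx : SpanMem x B) : SpanMem x C := by
  obtain ⟨m, -, e⟩ := hx
  exact e ▸ spanMem_msum B m hBC

theorem spanMem_append_right {x : Int} {l l2 : List Int} (h : SpanMem x l) :
    SpanMem x (l ++ l2) := by
  obtain ⟨m, hm, e⟩ := h
  exact ⟨m ++ List.replicate l2.length false, by simp [hm],
    by rw [msum_append l l2 m _ hm, msum_replicate_false, ixor_zero, e]⟩

def Dep (rows : List Int) : Prop :=
  ∃ m : List Bool, m.length = rows.length ∧ m.any id = true ∧ msum rows m = 0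

theorem not_dep_nil : ¬ Dep [] := by
  rintro ⟨m, hm, ha, -⟩
  rw [List.length_nil, List.length_eq_zero_iff] at hm
  subst hm
  simp at ha

theorem dep_append_right {l : List Int} (l2 : List Int) (h : Dep l) : Dep (l ++ l2) := by
  obtain ⟨m, hm, ha, hs⟩ := h
  exact ⟨m ++ List.replicate l2.length false, by simp [hm], by simp [ha],
    by rw [msum_append l l2 m _ hm, msum_replicate_false, hs, ixor_zero]⟩

theorem dep_concat_of_span {x : Int} {l : List Int} (h : SpanMem x l) : Dep (l ++ [x]) := by
  obtain ⟨m, hm, e⟩ := h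
  refine ⟨m ++ [true], by simp [hm], by simp, ?_⟩
  rw [msum_append l [x] m [true] hm, e]
  simp [msum, ixor_zero, ixor_self]

theorem land_msum_zero {l : Int} : ∀ (B : List Int) (m : List Bool),
    (∀ v ∈ B, Int.land v l = 0) → Int.land (msum B m) l = 0
  | _, [] => fun _ => by cases ‹List Int› <;> · simp only [msum]; exact iland_zero_left l
  | [], _ :: _ => fun _ => iland_zero_left l
  | v :: vs, b :: bs => fun h => by
    simp only [msum, iland_xor_right]
    rw [land_msum_zero vs bs fun w hw => h w (List.mem_cons_of_mem _ hw)]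
    cases b
    · simp [iland_zero_left, ixor_zero]
    · simp [h v List.mem_cons_self, ixor_zero]

theorem span_zero_of_pivots :
    ∀ (B : List Int), List.Pairwise (fun a b => lowbit a < lowbit b) B →
    (∀ v ∈ B, v ≠ 0) → ∀ (m : List Bool) (x : Int), msum B m = x →
    (∀ v ∈ B, Int.land x (lowbit v) = 0) → x = 0
  | [], _, _, m, x, hx, _ => by rw [← hx, msum_nil]
  | v :: vs, hp, h0, [], x, hx, _ => by rw [← hx]; rfl
  | v :: vs, hp, h0, b :: bs, x, hx, hz => by
    have hptail := (List.pairwise_cons.mp hp).2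
    have hphead := (List.pairwise_cons.mp hp).1
    have h0tail : ∀ w ∈ vs, w ≠ 0 := fun w hw => h0 w (List.mem_cons_of_mem _ hw)
    cases b with
    | false =>
      have : msum vs bs = x := by simpa [msum, zero_ixor] using hx
      exact span_zero_of_pivots vs hptail h0tail bs x this
        (fun w hw => hz w (List.mem_cons_of_mem _ hw))
    | true =>
      exfalso
      have hv0 : v ≠ 0 := h0 v List.mem_cons_self
      have hy : Int.land (msum vs bs) (lowbit v) = 0 :=
        land_msum_zero vs bs fun w hw =>
          land_lowbit_eq_zero_of_lt v w hv0 (h0tail w hw) (hphead w hw)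
      have hxv : Int.land x (lowbit v) = lowbit v := by
        rw [← hx]
        simp only [msum, cond_true, iland_xor_right, hy, land_lowbit_self, ixor_zero]
      have := hz v List.mem_cons_self
      rw [hxv] at this
      exact lowbit_ne_zero v hv0 this

-- ===== A-side =====
theorem msum_mapf (p : Int) (i : ℕ) (hL : Int.land p (-p) = 2 ^ i) :
    ∀ (rest : List Int) (m : List Bool),
    msum (rest.map fun r => if Int.land r (Int.land p (-p)) ≠ 0 then Int.xor r p else r) m
      = Int.xor (msum rest m)
          (if Int.land (msum rest m) (Int.land p (-p)) = 0 then 0 else p)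
  | rest, [] => by
    cases rest <;> simp [msum, iland_zero_left, ixor_zero]
  | [], _ :: _ => by
    simp [msum, iland_zero_left, ixor_zero]
  | r :: rs, b :: bs => by
    have ih := msum_mapf p i hL rs bs
    have hpl : Int.land p (Int.land p (-p)) = Int.land p (-p) := iland_absorb p (-p)
    have hlnz : Int.land p (-p) ≠ 0 := by rw [hL]; exact two_pow_ne_zero_int i
    have hcases : ∀ y : Int, Int.land y (Int.land p (-p)) = 0 ∨
        Int.land y (Int.land p (-p)) = Int.land p (-p) := by
      intro y; rw [hL, land_two_pow]; split <;> simp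
    simp only [List.map_cons, msum, ih]
    rcases hcases r with hr | hr <;> rcases hcases (msum rs bs) with hs | hs <;> cases b <;>
      simp [hr, hs, hpl, hlnz, iland_xor_right, ixor_zero, zero_ixor, ixor_self,
        ixor_assoc, ixor_left_comm, ixor_self_cancel, ixor_comm]

theorem eq_of_ixor_eq_zero {a b : Int} (h : Int.xor a b = 0) : a = b := by
  have : Int.xor (Int.xor a b) b = Int.xor 0 b := by rw [h]
  rwa [ixor_assoc, ixor_self, ixor_zero, zero_ixor] at this

theorem dep_concat_iff (rest : List Int) (p : Int) (i : ℕ) (hp : p ≠ 0)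
    (hL : Int.land p (-p) = 2 ^ i) :
    Dep (rest ++ [p]) ↔
      Dep (rest.map fun r => if Int.land r (Int.land p (-p)) ≠ 0 then Int.xor r p else r) := by
  have hlnz : Int.land p (-p) ≠ 0 := by rw [hL]; exact two_pow_ne_zero_int i
  constructor
  · rintro ⟨mm, hlen, hany, hsum⟩
    have hmmne : mm ≠ [] := by
      intro h0; rw [h0] at hlen; simp at hlen
    obtain ⟨m, c, rfl⟩ : ∃ m c, mm = m ++ [c] :=
      ⟨mm.dropLast, mm.getLast hmmne, (List.dropLast_append_getLast hmmne).symm⟩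
    have hmlen : m.length = rest.length := by simpa using hlen
    rw [msum_append rest [p] m [c] hmlen] at hsum
    have hm1 : msum [p] [c] = cond c p 0 := by simp [msum, ixor_zero]
    rw [hm1] at hsum
    cases c with
    | false =>
      have hs0 : msum rest m = 0 := by simpa [ixor_zero] using hsum
      refine ⟨m, by simp [hmlen], by simpa using hany, ?_⟩
      rw [msum_mapf p i hL rest m, hs0, iland_zero_left, if_pos rfl, ixor_zero]
    | true =>
      have hsp : msum rest m = p := eq_of_ixor_eq_zero hsum
      have hanym : m.any id = true := by
        by_contra hfalse
        have : msum rest m = 0 := msum_of_any_false rest m (by simpa using hfalse)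
        exact hp (by rw [← hsp, this])
      refine ⟨m, by simp [hmlen], hanym, ?_⟩
      rw [msum_mapf p i hL rest m, hsp, iland_absorb, if_neg hlnz, ixor_self]
  · rintro ⟨m, hlen, hany, hsum⟩
    have hmlen : m.length = rest.length := by simpa using hlen
    rw [msum_mapf p i hL rest m] at hsum
    by_cases hs : Int.land (msum rest m) (Int.land p (-p)) = 0
    · rw [if_pos hs, ixor_zero] at hsum
      refine ⟨m ++ [false], by simp [hmlen], by simpa using hany, ?_⟩
      rw [msum_append rest [p] m [false] hmlen, hsum]
      simp [msum, ixor_zero, zero_ixor]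
    · rw [if_neg hs] at hsum
      have hsp : msum rest m = p := eq_of_ixor_eq_zero hsum
      refine ⟨m ++ [true], by simp [hmlen], by simp, ?_⟩
      rw [msum_append rest [p] m [true] hmlen, hsp]
      simp [msum, ixor_zero, ixor_self]

theorem gf2Loop_iff : ∀ (n : ℕ) (rows : List Int), rows.length ≤ n →
    (gf2Loop rows = true ↔ ¬ Dep rows) := by
  intro n
  induction n with
  | zero =>
    intro rows hlen
    have : rows = [] := List.length_eq_zero_iff.mp (Nat.le_zero.mp hlen)
    subst this
    rw [gf2Loop, dif_pos rfl]
    exact ⟨fun _ => not_dep_nil, fun _ => rfl⟩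
  | succ n ih =>
    intro rows hlen
    by_cases h : rows = []
    · subst h
      rw [gf2Loop, dif_pos rfl]
      exact ⟨fun _ => not_dep_nil, fun _ => rfl⟩
    · have hsplit : rows.dropLast ++ [rows.getLast h] = rows :=
        List.dropLast_append_getLast h
      rw [gf2Loop, dif_neg h]
      by_cases hp : rows.getLast h = 0
      · rw [if_neg (by simpa using hp)]
        have hdep : Dep rows := by
          rw [← hsplit, hp]
          exact dep_concat_of_span (spanMem_zero _)
        simp [hdep]
      · rw [if_pos (by simpa using hp)]
        show gf2Loop (rows.dropLast.map fun r =>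
            if PySem.Int.band r (PySem.Int.band (rows.getLast h) (-rows.getLast h)) ≠ 0
            then PySem.Int.bxor r (rows.getLast h) else r) = true ↔ ¬ Dep rows
        obtain ⟨i, hL, -, -⟩ := lsb_spec (rows.getLast h) hp
        have hmap :
            (rows.dropLast.map fun r =>
              if PySem.Int.band r (PySem.Int.band (rows.getLast h) (-rows.getLast h)) ≠ 0
              then PySem.Int.bxor r (rows.getLast h) else r)
            = rows.dropLast.map fun r =>
              if Int.land r (Int.land (rows.getLast h) (-rows.getLast h)) ≠ 0
              then Int.xor r (rows.getLast h) else r := by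
          simp only [band_eq_land, bxor_eq_xor]
        rw [hmap]
        have hlen' : (rows.dropLast.map fun r =>
            if Int.land r (Int.land (rows.getLast h) (-rows.getLast h)) ≠ 0
            then Int.xor r (rows.getLast h) else r).length ≤ n := by
          have : rows.length ≠ 0 := fun h0 => h (List.length_eq_zero_iff.mp h0)
          simp only [List.length_map, List.length_dropLast]
          omega
        rw [ih _ hlen']
        rw [not_iff_not]
        rw [← dep_concat_iff rows.dropLast (rows.getLast h) i hp hL]
        rw [hsplit]

-- ===== B-side =====
theorem reduceRow_eq (basis : List Int) (row : Int) :
    reduceRow basis row =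
      basis.foldl (fun r v => if Int.land r (Int.land v (-v)) ≠ 0 then Int.xor r v else r) row := by
  simp only [reduceRow, band_eq_land, bxor_eq_xor]

theorem insertRow_cons (r v : Int) (vs : List Int) :
    insertRow r (v :: vs) =
      if lowbit v < lowbit r then v :: insertRow r vs else r :: v :: vs := by
  simp only [insertRow, band_eq_land, lowbit]
  split <;> rfl

theorem reduce_span : ∀ (basis : List Int) (r : Int),
    ∃ m : List Bool, m.length = basis.length ∧ reduceRow basis r = Int.xor r (msum basis m)
  | [], r => ⟨[], rfl, by rw [reduceRow_eq]; simp [msum, ixor_zero]⟩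
  | v :: vs, r => by
    rw [reduceRow_eq, List.foldl_cons]
    by_cases hc : Int.land r (Int.land v (-v)) ≠ 0
    · rw [if_pos hc]
      obtain ⟨m, hm, he⟩ := reduce_span vs (Int.xor r v)
      rw [reduceRow_eq] at he
      refine ⟨true :: m, by simpa using hm, ?_⟩
      rw [he]
      simp only [msum, cond_true]
      rw [ixor_assoc]
    · rw [if_neg hc]
      obtain ⟨m, hm, he⟩ := reduce_span vs r
      rw [reduceRow_eq] at he
      refine ⟨false :: m, by simpa using hm, ?_⟩
      rw [he]
      simp only [msum, cond_false, zero_ixor]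

theorem reduce_preserve : ∀ (vs : List Int) (r l : Int), Int.land r l = 0 →
    (∀ w ∈ vs, Int.land w l = 0) → Int.land (reduceRow vs r) l = 0
  | [], r, l, hr, _ => by rw [reduceRow_eq]; exact hr
  | v :: vs, r, l, hr, hw => by
    rw [reduceRow_eq, List.foldl_cons]
    have hv := hw v List.mem_cons_self
    have htail := fun w hw' => hw w (List.mem_cons_of_mem _ hw')
    by_cases hc : Int.land r (Int.land v (-v)) ≠ 0
    · rw [if_pos hc, ← reduceRow_eq]
      exact reduce_preserve vs _ l (by rw [iland_xor_right, hr, hv, ixor_zero]) htail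
    · rw [if_neg hc, ← reduceRow_eq]
      exact reduce_preserve vs r l hr htail

theorem reduce_pivots : ∀ (basis : List Int),
    List.Pairwise (fun a b => lowbit a < lowbit b) basis →
    (∀ v ∈ basis, v ≠ 0) → ∀ (r : Int), ∀ v ∈ basis,
    Int.land (reduceRow basis r) (lowbit v) = 0
  | [], _, _, _, _, hv => absurd hv (List.not_mem_nil)
  | w :: ws, hp, h0, r, v, hv => by
    have hphead := (List.pairwise_cons.mp hp).1
    have hptail := (List.pairwise_cons.mp hp).2
    have hw0 : w ≠ 0 := h0 w List.mem_cons_self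
    have h0tail : ∀ u ∈ ws, u ≠ 0 := fun u hu => h0 u (List.mem_cons_of_mem _ hu)
    rw [reduceRow_eq, List.foldl_cons, ← reduceRow_eq]
    have hstep : ∀ r1 : Int,
        (r1 = if Int.land r (Int.land w (-w)) ≠ 0 then Int.xor r w else r) →
        Int.land r1 (lowbit w) = 0 := by
      intro r1 hr1
      by_cases hc : Int.land r (Int.land w (-w)) ≠ 0
      · rw [hr1, if_pos hc, iland_xor_right]
        have : Int.land r (lowbit w) = lowbit w := by
          rcases land_lowbit_cases r w hw0 with h | h
          · exact absurd h (by simpa [lowbit] using hc)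
          · exact h
        rw [this, land_lowbit_self, ixor_self]
      · rw [hr1, if_neg hc]
        simpa [lowbit] using not_ne_iff.mp hc
    rcases List.mem_cons.mp hv with rfl | hv'
    · exact reduce_preserve ws _ (lowbit v) (hstep _ rfl)
        (fun u hu => land_lowbit_eq_zero_of_lt v u hw0 (h0tail u hu) (hphead u hu))
    · exact reduce_pivots ws hptail h0tail _ v hv'

theorem mem_insertRow : ∀ (B : List Int) (r a : Int),
    a ∈ insertRow r B ↔ a = r ∨ a ∈ B
  | [], r, a => by simp [insertRow]
  | v :: vs, r, a => by
    rw [insertRow_cons]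
    split
    · simp only [List.mem_cons, mem_insertRow vs r a]
      tauto
    · exact List.mem_cons

theorem sorted_insertRow : ∀ (B : List Int),
    List.Pairwise (fun a b => lowbit a < lowbit b) B → ∀ (r : Int),
    (∀ v ∈ B, lowbit v ≠ lowbit r) →
    List.Pairwise (fun a b => lowbit a < lowbit b) (insertRow r B)
  | [], _, r, _ => by simp [insertRow]
  | v :: vs, hp, r, hne => by
    have hphead := (List.pairwise_cons.mp hp).1
    have hptail := (List.pairwise_cons.mp hp).2
    rw [insertRow_cons]
    by_cases hlt : lowbit v < lowbit r
    · rw [if_pos hlt]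
      refine List.pairwise_cons.mpr ⟨?_, ?_⟩
      · intro w hw
        rcases (mem_insertRow vs r w).mp hw with rfl | hw'
        · exact hlt
        · exact hphead w hw'
      · exact sorted_insertRow vs hptail r fun w hw => hne w (List.mem_cons_of_mem _ hw)
    · rw [if_neg hlt]
      have hrv : lowbit r < lowbit v :=
        lt_of_le_of_ne (not_lt.mp hlt) (hne v List.mem_cons_self).symm
      refine List.pairwise_cons.mpr ⟨?_, hp⟩
      intro w hw
      rcases List.mem_cons.mp hw with rfl | hw'
      · exact hrv
      · exact lt_trans hrv (hphead w hw')

theorem altLoop_iff : ∀ (rows basis processed : List Int),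
    List.Pairwise (fun a b => lowbit a < lowbit b) basis →
    (∀ v ∈ basis, v ≠ 0) →
    (∀ v ∈ basis, SpanMem v processed) →
    (∀ r ∈ processed, SpanMem r basis) →
    ¬ Dep processed →
    (gf2AltLoop basis rows = true ↔ ¬ Dep (processed ++ rows))
  | [], basis, processed, _, _, _, _, hdep => by
    rw [List.append_nil]
    exact ⟨fun _ => hdep, fun _ => rfl⟩
  | row :: rest, basis, processed, hsorted, hnz, hBP, hPB, hdep => by
    show (if reduceRow basis row = 0 then false
          else gf2AltLoop (insertRow (reduceRow basis row) basis) rest) = true ↔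
         ¬ Dep (processed ++ row :: rest)
    obtain ⟨m, hm, he⟩ := reduce_span basis row
    have hsspan : SpanMem (msum basis m) basis := ⟨m, hm, rfl⟩
    have happ : processed ++ row :: rest = (processed ++ [row]) ++ rest := by
      rw [List.append_assoc, List.singleton_append]
    by_cases h0 : reduceRow basis row = 0
    · rw [if_pos h0]
      have hrow : row = msum basis m := by
        apply eq_of_ixor_eq_zero
        rw [← he, h0]
      have hrows : SpanMem row processed := by
        rw [hrow]
        exact spanMem_msum basis m hBP
      have hd : Dep (processed ++ row :: rest) := by
        rw [happ]
        exact dep_append_right rest (dep_concat_of_span hrows)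
      simp [hd]
    · rw [if_neg h0]
      have hpiv : ∀ v ∈ basis, Int.land (reduceRow basis row) (lowbit v) = 0 :=
        fun v hv => reduce_pivots basis hsorted hnz row v hv
      have hne : ∀ v ∈ basis, lowbit v ≠ lowbit (reduceRow basis row) := by
        intro v hv heq
        have h1 := hpiv v hv
        rw [heq, land_lowbit_self] at h1
        exact lowbit_ne_zero _ h0 h1
      have hsorted' := sorted_insertRow basis hsorted (reduceRow basis row) hne
      have hnz' : ∀ v ∈ insertRow (reduceRow basis row) basis, v ≠ 0 := by
        intro v hv
        rcases (mem_insertRow basis _ v).mp hv with rfl | hv'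
        · exact h0
        · exact hnz v hv'
      have hrowalt : row = Int.xor (reduceRow basis row) (msum basis m) := by
        rw [he, ixor_assoc, ixor_self, ixor_zero]
      have hsub : ∀ v ∈ basis, SpanMem v (insertRow (reduceRow basis row) basis) :=
        fun v hv => spanMem_of_mem ((mem_insertRow basis _ v).mpr (Or.inr hv))
      have hBP' : ∀ v ∈ insertRow (reduceRow basis row) basis, SpanMem v (processed ++ [row]) := by
        intro v hv
        rcases (mem_insertRow basis _ v).mp hv with rfl | hv'
        · rw [he]
          apply spanMem_xor
          · exact spanMem_of_mem (by simp)
          · exact spanMem_append_right (spanMem_msum basis m hBP)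
        · exact spanMem_append_right (hBP v hv')
      have hPB' : ∀ r ∈ processed ++ [row], SpanMem r (insertRow (reduceRow basis row) basis) := by
        intro r hr
        rcases List.mem_append.mp hr with hr' | hr'
        · exact spanMem_trans hsub (hPB r hr')
        · have hr2 : r = row := by simpa using hr'
          rw [hr2]
          nth_rewrite 1 [hrowalt]
          apply spanMem_xor
          · exact spanMem_of_mem ((mem_insertRow basis _ _).mpr (Or.inl rfl))
          · exact spanMem_trans hsub hsspan
      have hdep' : ¬ Dep (processed ++ [row]) := by
        rintro ⟨mm, hlen, hany, hsum⟩
        have hmmne : mm ≠ [] := by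
          intro hmm; rw [hmm] at hlen; simp at hlen
        obtain ⟨m1, c, rfl⟩ : ∃ m1 c, mm = m1 ++ [c] :=
          ⟨mm.dropLast, mm.getLast hmmne, (List.dropLast_append_getLast hmmne).symm⟩
        have hm1len : m1.length = processed.length := by simpa using hlen
        rw [msum_append processed [row] m1 [c] hm1len] at hsum
        have hm1 : msum [row] [c] = cond c row 0 := by simp [msum, ixor_zero]
        rw [hm1] at hsum
        cases c with
        | false =>
          exact hdep ⟨m1, hm1len, by simpa using hany, by simpa [ixor_zero] using hsum⟩
        | true =>
          have hrowp : row = msum processed m1 := (eq_of_ixor_eq_zero hsum).symm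
          have h1 : SpanMem row basis :=
            spanMem_trans hPB ⟨m1, hm1len, hrowp.symm⟩
          have h2 : SpanMem (reduceRow basis row) basis := by
            rw [he]
            exact spanMem_xor h1 hsspan
          obtain ⟨m2, hm2, he2⟩ := h2
          exact h0 (span_zero_of_pivots basis hsorted hnz m2 _ he2 hpiv)
      have := altLoop_iff rest (insertRow (reduceRow basis row) basis) (processed ++ [row])
        hsorted' hnz' hBP' hPB' hdep'
      rw [this, happ]

theorem gf2_eq_alt (rows : List Int) : gf2_indp rows = gf2_indp_alt rows := by
  have hA := gf2Loop_iff rows.length rows le_rfl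
  have hB := altLoop_iff rows [] [] (by simp) (by simp) (by simp) (by simp) not_dep_nil
  rw [List.nil_append] at hB
  have hiff : gf2Loop rows = true ↔ gf2AltLoop [] rows = true := hA.trans hB.symm
  unfold gf2_indp gf2_indp_alt
  cases h1 : gf2Loop rows <;> cases h2 : gf2AltLoop [] rows <;> simp_all

-- ===== VERDICT (by name: the statement is the Claim_ definition above) =====
theorem gf2_indp_spec : Claim_equal_gf2_indp := fun rows _ => gf2_eq_alt rows
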